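-- pv_equiv track=rewrite | github.com/robert1ridley/cross-prompt-trait-scoring | utils/general_utils.py | separate_attributes_for_scoring
-- ===== SOURCE A (Python) =====
-- def get_score_vector_positions():
--     return {
--         'score': 0,
--         'content': 1,
--         'organization': 2,
--         'word_choice': 3,
--         'sentence_fluency': 4,
--         'conventions': 5,
--         'prompt_adherence': 6,
--         'language': 7,
--         'narrativity': 8,
--         # 'style': 9,
--         # 'voice': 10
--     }
--
-- def get_min_max_scores():
--     return {
--         1: {'score': (2, 12), 'content': (1, 6), 'organization': (1, 6), 'word_choice': (1, 6),
--             'sentence_fluency': (1, 6), 'conventions': (1, 6)},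
--         2: {'score': (1, 6), 'content': (1, 6), 'organization': (1, 6), 'word_choice': (1, 6),
--             'sentence_fluency': (1, 6), 'conventions': (1, 6)},
--         3: {'score': (0, 3), 'content': (0, 3), 'prompt_adherence': (0, 3), 'language': (0, 3), 'narrativity': (0, 3)},
--         4: {'score': (0, 3), 'content': (0, 3), 'prompt_adherence': (0, 3), 'language': (0, 3), 'narrativity': (0, 3)},
--         5: {'score': (0, 4), 'content': (0, 4), 'prompt_adherence': (0, 4), 'language': (0, 4), 'narrativity': (0, 4)},
--         6: {'score': (0, 4), 'content': (0, 4), 'prompt_adherence': (0, 4), 'language': (0, 4), 'narrativity': (0, 4)},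
--         7: {'score': (0, 30), 'content': (0, 6), 'organization': (0, 6), 'conventions': (0, 6)},
--         8: {'score': (0, 60), 'content': (2, 12), 'organization': (2, 12), 'word_choice': (2, 12),
--             'sentence_fluency': (2, 12), 'conventions': (2, 12)}}
--
-- def separate_attributes_for_scoring(scores, set_ids):
--     score_vector_positions = get_score_vector_positions()
--     min_max_scores = get_min_max_scores()
--     individual_att_scores_dict = {att: [] for att in score_vector_positions.keys()}
--     score_set_comb = list(zip(scores, set_ids))
--     for att_scores, set_id in score_set_comb:
--         for relevant_attribute in min_max_scores[set_id].keys():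
--             att_position = score_vector_positions[relevant_attribute]
--             individual_att_scores_dict[relevant_attribute].append(att_scores[att_position])
--     return individual_att_scores_dict
-- ===== SOURCE B (Python) =====
-- def get_score_vector_positions():
--     return {
--         'score': 0,
--         'content': 1,
--         'organization': 2,
--         'word_choice': 3,
--         'sentence_fluency': 4,
--         'conventions': 5,
--         'prompt_adherence': 6,
--         'language': 7,
--         'narrativity': 8,
--     }
--
-- def get_min_max_scores():
--     return {
--         1: {'score': (2, 12), 'content': (1, 6), 'organization': (1, 6), 'word_choice': (1, 6),
--             'sentence_fluency': (1, 6), 'conventions': (1, 6)},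
--         2: {'score': (1, 6), 'content': (1, 6), 'organization': (1, 6), 'word_choice': (1, 6),
--             'sentence_fluency': (1, 6), 'conventions': (1, 6)},
--         3: {'score': (0, 3), 'content': (0, 3), 'prompt_adherence': (0, 3), 'language': (0, 3), 'narrativity': (0, 3)},
--         4: {'score': (0, 3), 'content': (0, 3), 'prompt_adherence': (0, 3), 'language': (0, 3), 'narrativity': (0, 3)},
--         5: {'score': (0, 4), 'content': (0, 4), 'prompt_adherence': (0, 4), 'language': (0, 4), 'narrativity': (0, 4)},
--         6: {'score': (0, 4), 'content': (0, 4), 'prompt_adherence': (0, 4), 'language': (0, 4), 'narrativity': (0, 4)},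
--         7: {'score': (0, 30), 'content': (0, 6), 'organization': (0, 6), 'conventions': (0, 6)},
--         8: {'score': (0, 60), 'content': (2, 12), 'organization': (2, 12), 'word_choice': (2, 12),
--             'sentence_fluency': (2, 12), 'conventions': (2, 12)}}
--
-- def separate_attributes_for_scoring(scores, set_ids):
--     min_max_scores = get_min_max_scores()
--
--     def sets_using(att):
--         # inverted index: the essay sets whose rubric contains this attribute
--         return [sid for sid, atts in min_max_scores.items() if att in atts]
--
--     return {att: [row[pos]
--                   for row, sid in zip(scores, set_ids)
--                   if sid in sets_using(att)]
--             for att, pos in get_score_vector_positions().items()}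
-- ===== Notes on version B (the rewrite author's own statement) =====
-- stated objective: alternative
-- what changed: B inverts the lookup: it builds, per attribute, the list of set ids whose rubric uses that attribute, and fills each output list by its own filtered pass over the essays, instead of A's single joint pass that mutates nine accumulator lists keyed by each essay's set id.
import Mathlib
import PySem

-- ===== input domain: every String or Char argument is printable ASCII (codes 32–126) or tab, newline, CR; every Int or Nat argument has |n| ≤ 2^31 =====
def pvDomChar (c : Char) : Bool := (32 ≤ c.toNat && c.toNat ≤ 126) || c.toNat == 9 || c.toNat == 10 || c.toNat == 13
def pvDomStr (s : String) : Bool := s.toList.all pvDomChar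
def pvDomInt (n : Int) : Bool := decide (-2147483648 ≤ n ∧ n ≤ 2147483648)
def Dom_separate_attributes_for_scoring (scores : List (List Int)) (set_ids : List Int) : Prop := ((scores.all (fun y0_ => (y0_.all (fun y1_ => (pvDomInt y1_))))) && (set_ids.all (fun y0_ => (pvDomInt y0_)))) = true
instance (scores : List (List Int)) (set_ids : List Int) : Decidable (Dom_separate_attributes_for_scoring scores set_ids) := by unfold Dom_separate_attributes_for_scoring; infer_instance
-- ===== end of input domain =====

-- B inverts the lookup (per-attribute list of set ids that use it, one filtered pass per
-- attribute) instead of A's single joint pass mutating nine accumulator lists; equal on Pre_.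

-- ===== PORT A =====
-- get_score_vector_positions(): the dict as an insertion-ordered association list
def pvAtts : List (String × Int) :=
  [("score", 0), ("content", 1), ("organization", 2), ("word_choice", 3),
   ("sentence_fluency", 4), ("conventions", 5), ("prompt_adherence", 6),
   ("language", 7), ("narrativity", 8)]

-- min_max_scores[set_id].keys() (only the keys matter to the function); [] stands for the
-- KeyError on an unknown set_id, which Pre_ excludes
def pvKeysOf (set_id : Int) : List String :=
  if set_id = 1 ∨ set_id = 2 ∨ set_id = 8 then
    ["score", "content", "organization", "word_choice", "sentence_fluency", "conventions"]
  else if set_id = 3 ∨ set_id = 4 ∨ set_id = 5 ∨ set_id = 6 then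
    ["score", "content", "prompt_adherence", "language", "narrativity"]
  else if set_id = 7 then
    ["score", "content", "organization", "conventions"]
  else []

-- score_vector_positions[att]
def pvPosOf (att : String) : Int := (pvAtts.lookup att).getD 0

-- att_scores[pos]; Pre_ keeps pos in range, the 0 default is never reached there (IndexError)
def pvGetScore (att_scores : List Int) (pos : Int) : Int :=
  (PySem.List.pyGet? att_scores pos).getD 0

-- individual_att_scores_dict[att].append(v) (dict insertion order is preserved by appends)
def pvAppendAt (d : List (String × List Int)) (att : String) (v : Int) :
    List (String × List Int) :=
  d.map (fun e => if e.1 = att then (e.1, e.2 ++ [v]) else e)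

-- body of A's outer loop: the inner loop over min_max_scores[set_id].keys()
def pvStepA (d : List (String × List Int)) (p : List Int × Int) : List (String × List Int) :=
  (pvKeysOf p.2).foldl (fun d att => pvAppendAt d att (pvGetScore p.1 (pvPosOf att))) d

def separate_attributes_for_scoring (scores : List (List Int)) (set_ids : List Int) :
    List (String × List Int) :=
  (List.zip scores set_ids).foldl pvStepA (pvAtts.map (fun ap => (ap.1, ([] : List Int))))

-- ===== PORT B =====
-- min_max_scores as B iterates it: (set id, rubric attribute names); the (min,max) values
-- are never read by B, so the port carries the keys only
def pvMinMaxB : List (Int × List String) :=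
  [(1, ["score", "content", "organization", "word_choice", "sentence_fluency", "conventions"]),
   (2, ["score", "content", "organization", "word_choice", "sentence_fluency", "conventions"]),
   (3, ["score", "content", "prompt_adherence", "language", "narrativity"]),
   (4, ["score", "content", "prompt_adherence", "language", "narrativity"]),
   (5, ["score", "content", "prompt_adherence", "language", "narrativity"]),
   (6, ["score", "content", "prompt_adherence", "language", "narrativity"]),
   (7, ["score", "content", "organization", "conventions"]),
   (8, ["score", "content", "organization", "word_choice", "sentence_fluency", "conventions"])]

-- sets_using(att): the inverted index — set ids whose rubric contains the attribute
def pvSetsUsing (att : String) : List Int :=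
  (pvMinMaxB.filter (fun e => e.2.contains att)).map (fun e => e.1)

def pvPositionsB : List (String × Int) :=
  [("score", 0), ("content", 1), ("organization", 2), ("word_choice", 3),
   ("sentence_fluency", 4), ("conventions", 5), ("prompt_adherence", 6),
   ("language", 7), ("narrativity", 8)]

def separate_attributes_for_scoring_alt (scores : List (List Int)) (set_ids : List Int) :
    List (String × List Int) :=
  pvPositionsB.map (fun ap =>
    (ap.1, (List.zip scores set_ids).filterMap (fun p =>
      if (pvSetsUsing ap.1).contains p.2 then some ((PySem.List.pyGet? p.1 ap.2).getD 0)
      else none)))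

-- ===== PRECONDITION & SPEC =====
-- Pre_ excludes exactly the inputs on which A raises: a set_id outside 1..8 (KeyError) or an
-- essay score vector too short for the attributes its set uses (IndexError).
def Pre_separate_attributes_for_scoring (scores : List (List Int)) (set_ids : List Int) : Prop :=
  ∀ p ∈ List.zip scores set_ids,
    ((p.2 = 1 ∨ p.2 = 2 ∨ p.2 = 7 ∨ p.2 = 8) ∧ 6 ≤ p.1.length) ∨
    ((p.2 = 3 ∨ p.2 = 4 ∨ p.2 = 5 ∨ p.2 = 6) ∧ 9 ≤ p.1.length)
instance (scores : List (List Int)) (set_ids : List Int) : Decidable (Pre_separate_attributes_for_scoring scores set_ids) := by unfold Pre_separate_attributes_for_scoring; infer_instance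

def pvWitness_separate_attributes_for_scoring : List (List Int) × List Int :=
  ([[1, 2, 3, 4, 5, 6], [0, 1, 2, 3, 4, 5, 6, 7, 8]], [1, 3])

def Spec_separate_attributes_for_scoring (scores : List (List Int)) (set_ids : List Int) (out : List (String × List Int)) : Prop := out = separate_attributes_for_scoring_alt scores set_ids
instance (scores : List (List Int)) (set_ids : List Int) (out : List (String × List Int)) : Decidable (Spec_separate_attributes_for_scoring scores set_ids out) := by unfold Spec_separate_attributes_for_scoring; infer_instance

-- ===== CLAIM =====
def Claim_equal_separate_attributes_for_scoring : Prop := ∀ (scores : List (List Int)) (set_ids : List Int), Dom_separate_attributes_for_scoring scores set_ids → Pre_separate_attributes_for_scoring scores set_ids → Spec_separate_attributes_for_scoring scores set_ids (separate_attributes_for_scoring scores set_ids)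


-- ===== LEMMAS AND PROOFS =====

-- what the invariant collects for one attribute, phrased through A's keys-of-set lookup
def pvColl (L : List (List Int × Int)) (att : String) (pos : Int) : List Int :=
  L.filterMap (fun p => if att ∈ pvKeysOf p.2 then some (pvGetScore p.1 pos) else none)

-- the loop invariant: A's fold from any 9-entry state appends exactly the per-attribute lists
theorem pvFold_inv (L : List (List Int × Int))
    (v0 v1 v2 v3 v4 v5 v6 v7 v8 : List Int) :
    L.foldl pvStepA
      [("score", v0), ("content", v1), ("organization", v2), ("word_choice", v3),
       ("sentence_fluency", v4), ("conventions", v5), ("prompt_adherence", v6),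
       ("language", v7), ("narrativity", v8)]
    = [("score", v0 ++ pvColl L "score" 0), ("content", v1 ++ pvColl L "content" 1),
       ("organization", v2 ++ pvColl L "organization" 2),
       ("word_choice", v3 ++ pvColl L "word_choice" 3),
       ("sentence_fluency", v4 ++ pvColl L "sentence_fluency" 4),
       ("conventions", v5 ++ pvColl L "conventions" 5),
       ("prompt_adherence", v6 ++ pvColl L "prompt_adherence" 6),
       ("language", v7 ++ pvColl L "language" 7),
       ("narrativity", v8 ++ pvColl L "narrativity" 8)] := by
  induction L generalizing v0 v1 v2 v3 v4 v5 v6 v7 v8 with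
  | nil => simp [pvColl]
  | cons p L ih =>
    obtain ⟨s, id⟩ := p
    by_cases h1 : id = 1 ∨ id = 2 ∨ id = 8
    · simp [pvStepA, pvKeysOf, if_pos h1, pvAppendAt, pvPosOf, pvAtts, List.lookup, ih, pvColl]
    · by_cases h2 : id = 3 ∨ id = 4 ∨ id = 5 ∨ id = 6
      · simp [pvStepA, pvKeysOf, if_neg h1, if_pos h2, pvAppendAt, pvPosOf, pvAtts, List.lookup, ih, pvColl]
      · by_cases h3 : id = 7
        · simp [pvStepA, pvKeysOf, if_neg h1, if_neg h2, if_pos h3, pvAppendAt, pvPosOf, pvAtts, List.lookup, ih, pvColl]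
        · simp [pvStepA, pvKeysOf, if_neg h1, if_neg h2, if_neg h3, ih, pvColl]

-- bridging the inverted index back to A's lookup: sid uses att  iff  att is in sid's rubric
theorem pvSetsUsing_mem (att : String) (sid : Int) :
    sid ∈ pvSetsUsing att ↔ att ∈ pvKeysOf sid := by
  have : sid ∈ pvSetsUsing att ↔ ∃ e ∈ pvMinMaxB, att ∈ e.2 ∧ e.1 = sid := by
    simp [pvSetsUsing, List.mem_filter, List.mem_map]
  rw [this]
  unfold pvKeysOf
  by_cases h1 : sid = 1 ∨ sid = 2 ∨ sid = 8
  · rcases h1 with h|h|h <;> subst h <;> (simp [pvMinMaxB]; try tauto)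
  · by_cases h2 : sid = 3 ∨ sid = 4 ∨ sid = 5 ∨ sid = 6
    · rcases h2 with h|h|h|h <;> subst h <;> (simp [pvMinMaxB]; try tauto)
    · by_cases h3 : sid = 7
      · subst h3; (simp [pvMinMaxB]; try tauto)
      · simp [pvMinMaxB, if_neg h1, if_neg h2, if_neg h3]
        refine ⟨fun _ => ?_, fun _ => ?_, fun _ => ?_, fun _ => ?_, fun _ => ?_,
          fun _ => ?_, fun _ => ?_, fun _ => ?_⟩ <;> omega

-- B's per-attribute pass equals the invariant's collection
theorem pvCollB_eq (att : String) (pos : Int) (L : List (List Int × Int)) :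
    L.filterMap (fun p =>
      if p.2 ∈ pvSetsUsing att then some ((PySem.List.pyGet? p.1 pos).getD 0)
      else none) = pvColl L att pos := by
  unfold pvColl pvGetScore
  induction L with
  | nil => rfl
  | cons p L ih =>
    rw [List.filterMap_cons, List.filterMap_cons, ih]
    by_cases h : att ∈ pvKeysOf p.2
    · simp [h, (pvSetsUsing_mem att p.2).mpr h]
    · have h' : p.2 ∉ pvSetsUsing att := fun hc => h ((pvSetsUsing_mem att p.2).mp hc)
      simp [h, h']

-- ===== VERDICT =====
theorem separate_attributes_for_scoring_spec : Claim_equal_separate_attributes_for_scoring := by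
  intro scores set_ids _ _
  unfold Spec_separate_attributes_for_scoring
  unfold separate_attributes_for_scoring separate_attributes_for_scoring_alt
  rw [show (pvAtts.map (fun ap => (ap.1, ([] : List Int)))) =
      [("score", ([]:List Int)), ("content", []), ("organization", []), ("word_choice", []),
       ("sentence_fluency", []), ("conventions", []), ("prompt_adherence", []),
       ("language", []), ("narrativity", [])] from rfl]
  rw [pvFold_inv]
  simp [pvPositionsB, pvCollB_eq]
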